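-- pv_equiv track=rewrite | github.com/Spaklak/MIREA_solves | algorythms/1-2/22.py | checkPick
-- ===== SOURCE A (Python) =====
-- def checkPick(arr):
--     for i in range(len(arr)):
--         flag = 1
--         for x in range(0, i):
--             if not(arr[x] < arr[i]):
--                 flag = 0
--         if flag:
--             for x in range(i+1, len(arr)):
--                 if not(arr[i] > arr[x]):
--                     flag = 0
--         if flag:
--             if (i == 0) or (i == len(arr) - 1):
--                 return 0
--             return arr[i]
--     return 0
-- ===== SOURCE B (Python) =====
-- def checkPick(arr):
--     # Single pass: track the maximum, its first index, and how many times it occurs.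
--     if not arr:
--         return 0
--     best = arr[0]
--     idx = 0
--     cnt = 1
--     j = 1
--     for v in arr[1:]:
--         if v > best:
--             best, idx, cnt = v, j, 1
--         elif v == best:
--             cnt += 1
--         j += 1
--     if cnt == 1 and 0 < idx < len(arr) - 1:
--         return best
--     return 0
-- ===== Notes on version B (the rewrite author's own statement) =====
-- stated objective: faster
-- what changed: A tests every index with two inner scans (quadratic); B makes one pass tracking the maximum, its first index and its multiplicity, then returns it only if unique and not at either end.
import Mathlib
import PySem

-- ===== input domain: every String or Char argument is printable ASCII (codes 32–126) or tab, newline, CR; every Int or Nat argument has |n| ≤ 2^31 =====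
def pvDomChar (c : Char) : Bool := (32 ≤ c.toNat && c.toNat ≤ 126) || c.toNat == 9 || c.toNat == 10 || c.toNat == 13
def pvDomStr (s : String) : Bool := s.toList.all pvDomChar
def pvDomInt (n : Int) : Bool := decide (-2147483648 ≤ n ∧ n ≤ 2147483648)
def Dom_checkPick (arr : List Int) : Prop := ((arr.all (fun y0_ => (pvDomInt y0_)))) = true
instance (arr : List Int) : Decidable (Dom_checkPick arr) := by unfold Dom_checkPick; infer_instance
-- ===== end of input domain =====

-- B replaces A's quadratic per-index scans by a single pass tracking the maximum,
-- its first index and its multiplicity (objective: faster, asymptotic O(n^2) -> O(n)).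


-- ===== PORT A =====
-- arr[x] for an index produced by range(...) is always in range, so pyGetD is exact here.
def pvGet (arr : List Int) (x : Nat) : Int := PySem.List.pyGetD arr (x : Int) 0

-- the first inner loop: for x in range(0, i): if not(arr[x] < arr[i]): flag = 0
def pvFlag1 (arr : List Int) (i : Nat) : Int :=
  (List.range i).foldl (fun fl x => if ¬ (pvGet arr x < pvGet arr i) then 0 else fl) 1

-- the second inner loop: for x in range(i+1, len(arr)): if not(arr[i] > arr[x]): flag = 0
def pvFlag2 (arr : List Int) (i : Nat) (fl : Int) : Int :=
  (List.range' (i+1) (arr.length - (i+1))).foldl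
    (fun fl x => if ¬ (pvGet arr i > pvGet arr x) then 0 else fl) fl

-- the outer loop with its early returns, over the remaining indices of range(len(arr))
def pvFindA (arr : List Int) : List Nat → Int
  | [] => 0
  | i :: rest =>
      let flag := pvFlag1 arr i
      let flag := if flag ≠ 0 then pvFlag2 arr i flag else flag
      if flag ≠ 0 then
        if i = 0 ∨ i = arr.length - 1 then 0 else pvGet arr i
      else pvFindA arr rest

def checkPick (arr : List Int) : Int := pvFindA arr (List.range arr.length)

-- ===== PORT B =====
-- single pass over the tail: (j = index of next element, best, idx of first best, count of best)
def pvScanB (l : List Int) (j best idx cnt : Int) : Int × Int × Int :=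
  match l with
  | [] => (best, idx, cnt)
  | v :: rest =>
      if v > best then pvScanB rest (j + 1) v j 1
      else if v = best then pvScanB rest (j + 1) best idx (cnt + 1)
      else pvScanB rest (j + 1) best idx cnt

def checkPick_alt (arr : List Int) : Int :=
  match arr with
  | [] => 0
  | a :: rest =>
      let r := pvScanB rest 1 a 0 1
      if r.2.2 = 1 ∧ 0 < r.2.1 ∧ r.2.1 < ((a :: rest).length : Int) - 1 then r.1 else 0

-- ===== PRECONDITION & SPEC =====
def Spec_checkPick (arr : List Int) (out : Int) : Prop := out = checkPick_alt arr
instance (arr : List Int) (out : Int) : Decidable (Spec_checkPick arr out) := by unfold Spec_checkPick; infer_instance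

-- ===== CLAIM (what is proved, stated in full; the proofs are below) =====
def Claim_equal_checkPick : Prop := ∀ (arr : List Int), Dom_checkPick arr → Spec_checkPick arr (checkPick arr)

-- ===== LEMMAS AND PROOFS =====

-- A's flag loops keep the flag iff every scanned index passes the test
theorem foldl_flag (P : Nat → Prop) [DecidablePred P] (l : List Nat) (s : Int) :
    l.foldl (fun fl x => if ¬ P x then 0 else fl) s
      = if ∀ x ∈ l, P x then s else 0 := by
  induction l generalizing s with
  | nil => simp
  | cons h t ih =>
      simp only [List.foldl_cons, ih]
      by_cases hp : P h
      · simp [hp]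
      · simp only [hp, not_false_iff, if_true]
        split_ifs <;> simp_all

-- one-step reductions of B's scan
theorem pvScanB_cons_gt (v best j idx cnt : Int) (rest : List Int) (h : v > best) :
    pvScanB (v :: rest) j best idx cnt = pvScanB rest (j + 1) v j 1 := by
  simp only [pvScanB, if_pos h]

theorem pvScanB_cons_self (v j idx cnt : Int) (rest : List Int) :
    pvScanB (v :: rest) j v idx cnt = pvScanB rest (j + 1) v idx (cnt + 1) := by
  simp [pvScanB]

theorem pvScanB_cons_lt (v best j idx cnt : Int) (rest : List Int) (h1 : ¬ v > best)
    (h2 : ¬ v = best) :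
    pvScanB (v :: rest) j best idx cnt = pvScanB rest (j + 1) best idx cnt := by
  simp only [pvScanB, if_neg h1, if_neg h2]

-- the condition A's flag encodes at index i
def CondA (arr : List Int) (i : Nat) : Prop :=
  (∀ x, x < i → pvGet arr x < pvGet arr i) ∧
  (∀ x, x < arr.length → i < x → pvGet arr i > pvGet arr x)

theorem condA_iff (arr : List Int) (i : Nat) :
    ((∀ x ∈ List.range i, pvGet arr x < pvGet arr i) ∧
     (∀ x ∈ List.range' (i+1) (arr.length - (i+1)), pvGet arr i > pvGet arr x))
      ↔ CondA arr i := by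
  unfold CondA
  constructor
  · rintro ⟨h1, h2⟩
    refine ⟨fun x hx => h1 x (List.mem_range.mpr hx), fun x hx hix => ?_⟩
    exact h2 x (List.mem_range'_1.mpr ⟨by omega, by omega⟩)
  · rintro ⟨h1, h2⟩
    refine ⟨fun x hx => h1 x (List.mem_range.mp hx), fun x hx => ?_⟩
    rcases List.mem_range'_1.mp hx with ⟨hx1, hx2⟩
    exact h2 x (by omega) (by omega)

-- the combined flag after both inner loops is 0 iff the condition fails
theorem flag_iff (arr : List Int) (i : Nat) :
    ((if pvFlag1 arr i = 0 then pvFlag1 arr i else pvFlag2 arr i (pvFlag1 arr i)) = 0)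
      ↔ ¬ CondA arr i := by
  rw [← condA_iff]
  unfold pvFlag1 pvFlag2
  rw [foldl_flag (fun x => pvGet arr x < pvGet arr i)]
  rw [foldl_flag (fun x => pvGet arr i > pvGet arr x)]
  by_cases h1 : ∀ x ∈ List.range i, pvGet arr x < pvGet arr i
  · rw [if_pos h1, if_neg (by norm_num : ¬ (1 : ℤ) = 0)]
    by_cases h2 : ∀ x ∈ List.range' (i+1) (arr.length - (i+1)), pvGet arr i > pvGet arr x
    · rw [if_pos h2]
      exact iff_of_false (by norm_num) (fun hn => hn ⟨h1, h2⟩)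
    · rw [if_neg h2]
      exact iff_of_true rfl (fun hc => h2 hc.2)
  · rw [if_neg h1, if_pos (rfl : (0 : ℤ) = 0)]
    exact iff_of_true rfl (fun hc => h1 hc.1)

-- running the outer loop when no remaining index satisfies the condition
theorem pvFindA_none (arr : List Int) (l : List Nat)
    (h : ∀ i ∈ l, ¬ CondA arr i) : pvFindA arr l = 0 := by
  induction l with
  | nil => rfl
  | cons i rest ih =>
      have hi : ¬ CondA arr i := h i (by simp)
      unfold pvFindA
      simp only [ne_eq, ite_not]
      rw [if_pos ((flag_iff arr i).mpr hi)]
      exact ih (fun j hj => h j (by simp [hj]))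

-- running the outer loop when k is the unique satisfying index in the remaining list
theorem pvFindA_unique (arr : List Int) (k : Nat) (hk : CondA arr k) :
    ∀ l : List Nat, k ∈ l → (∀ i ∈ l, CondA arr i → i = k) →
    pvFindA arr l = (if k = 0 ∨ k = arr.length - 1 then 0 else pvGet arr k) := by
  intro l
  induction l with
  | nil => intro h; simp at h
  | cons i rest ih =>
      intro hmem huniq
      unfold pvFindA
      simp only [ne_eq, ite_not]
      by_cases hc : CondA arr i
      · have : i = k := huniq i (by simp) hc
        subst this
        rw [if_neg (fun h => ((flag_iff arr i).mp h) hc)]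
      · rw [if_pos ((flag_iff arr i).mpr hc)]
        have : k ∈ rest := by
          rcases List.mem_cons.mp hmem with h | h
          · exact absurd (h ▸ hk) hc
          · exact h
        exact ih this (fun j hj => huniq j (by simp [hj]))

-- B's scan invariant: starting from a correct summary of pre, it produces a correct
-- summary of pre ++ rest (best = max, idx = first index of best, cnt = its count)
theorem pvScanB_inv (rest : List Int) : ∀ (pre : List Int) (best : Int),
    best ∈ pre → (∀ v ∈ pre, v ≤ best) →
    (pvScanB rest (pre.length : Int) best ((pre.idxOf best : Nat) : Int) ((pre.count best : Nat) : Int)).1 ∈ pre ++ rest ∧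
    (∀ v ∈ pre ++ rest, v ≤ (pvScanB rest (pre.length : Int) best ((pre.idxOf best : Nat) : Int) ((pre.count best : Nat) : Int)).1) ∧
    (pvScanB rest (pre.length : Int) best ((pre.idxOf best : Nat) : Int) ((pre.count best : Nat) : Int)).2.1
      = (((pre ++ rest).idxOf (pvScanB rest (pre.length : Int) best ((pre.idxOf best : Nat) : Int) ((pre.count best : Nat) : Int)).1 : Nat) : Int) ∧
    (pvScanB rest (pre.length : Int) best ((pre.idxOf best : Nat) : Int) ((pre.count best : Nat) : Int)).2.2
      = (((pre ++ rest).count (pvScanB rest (pre.length : Int) best ((pre.idxOf best : Nat) : Int) ((pre.count best : Nat) : Int)).1 : Nat) : Int) := by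
  induction rest with
  | nil =>
      intro pre best hmem hle
      rw [List.append_nil]
      exact ⟨hmem, hle, rfl, rfl⟩
  | cons v rest ih =>
      intro pre best hmem hle
      have hassoc : pre ++ v :: rest = (pre ++ [v]) ++ rest := by simp
      by_cases hgt : v > best
      · have hnot : v ∉ pre := fun h => absurd (hle v h) (by omega)
        have h1 : ((pre ++ [v]).length : Int) = (pre.length : Int) + 1 := by simp
        have h2 : (pre ++ [v]).idxOf v = pre.length := by
          rw [List.idxOf_append_of_notMem hnot]; simp
        have h3 : (pre ++ [v]).count v = 1 := by
          rw [List.count_append, List.count_eq_zero.mpr hnot]; simp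
        have := ih (pre ++ [v]) v (by simp) (by
          intro w hw
          rcases List.mem_append.mp hw with h | h
          · exact le_of_lt (lt_of_le_of_lt (hle w h) hgt)
          · simp at h; omega)
        rw [h1, h2, h3] at this
        rw [pvScanB_cons_gt _ _ _ _ _ _ hgt, hassoc]
        exact_mod_cast this
      · by_cases heq : v = best
        · subst heq
          have h1 : ((pre ++ [v]).length : Int) = (pre.length : Int) + 1 := by simp
          have h2 : (pre ++ [v]).idxOf v = pre.idxOf v := List.idxOf_append_of_mem hmem
          have h3 : ((pre ++ [v]).count v : Int) = (pre.count v : Int) + 1 := by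
            rw [List.count_append]; simp
          have := ih (pre ++ [v]) v (by simp) (by
            intro w hw
            rcases List.mem_append.mp hw with h | h
            · exact hle w h
            · simp at h; omega)
          rw [h1, h2, h3] at this
          rw [pvScanB_cons_self, hassoc]
          exact_mod_cast this
        · have h1 : ((pre ++ [v]).length : Int) = (pre.length : Int) + 1 := by simp
          have h2 : (pre ++ [v]).idxOf best = pre.idxOf best := List.idxOf_append_of_mem hmem
          have hne : best ≠ v := fun h => heq h.symm
          have h3 : (pre ++ [v]).count best = pre.count best := by
            rw [List.count_append]
            simp [List.count_eq_zero, hne]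
          have := ih (pre ++ [v]) best (by simp [hmem]) (by
            intro w hw
            rcases List.mem_append.mp hw with h | h
            · exact hle w h
            · simp at h; subst h; omega)
          rw [h1, h2, h3] at this
          rw [pvScanB_cons_lt _ _ _ _ _ _ hgt heq, hassoc]
          exact_mod_cast this

-- pvGet agrees with getElem inside the list
theorem pvGet_eq (arr : List Int) (j : Nat) (h : j < arr.length) : pvGet arr j = arr[j] := by
  simp [pvGet, List.getD_eq_getElem?_getD, List.getElem?_eq_getElem h]

-- a value occurring at exactly one position has count 1
theorem count_eq_one_of_unique (l : List Int) (M : Int) (k : Nat) (hk : k < l.length)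
    (hv : l[k] = M) (huniq : ∀ j, (h : j < l.length) → j ≠ k → l[j] ≠ M) :
    l.count M = 1 := by
  have hsplit : l.take k ++ l[k] :: l.drop (k + 1) = l := by
    rw [List.getElem_cons_drop, List.take_append_drop]
  have htake : (l.take k).count M = 0 := by
    rw [List.count_eq_zero]
    intro hmem
    rcases List.mem_iff_getElem.mp hmem with ⟨j, hj, hje⟩
    have hj' : j < k := by rw [List.length_take] at hj; omega
    rw [List.getElem_take] at hje
    exact huniq j (by omega) (by omega) hje
  have hdrop : (l.drop (k + 1)).count M = 0 := by
    rw [List.count_eq_zero]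
    intro hmem
    rcases List.mem_iff_getElem.mp hmem with ⟨j, hj, hje⟩
    have hj' : j < l.length - (k + 1) := by rw [List.length_drop] at hj; omega
    rw [List.getElem_drop] at hje
    exact huniq (k + 1 + j) (by omega) (by omega) hje
  calc l.count M = (l.take k ++ l[k] :: l.drop (k + 1)).count M := by rw [hsplit]
    _ = 1 := by rw [List.count_append, htake, List.count_cons, hdrop, hv]; simp

-- helper: two distinct positions carrying the same value force count ≥ 2
theorem two_le_count_of_two_pos (l : List Int) (M : Int) (j k : Nat)
    (hj : j < l.length) (hk : k < l.length) (hlt : j < k)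
    (hje : l[j] = M) (hke : l[k] = M) : 2 ≤ l.count M := by
  have hsplit : l.take k ++ l[k] :: l.drop (k + 1) = l := by
    rw [List.getElem_cons_drop, List.take_append_drop]
  have hmem : M ∈ l.take k := by
    rw [List.mem_iff_getElem]
    refine ⟨j, by rw [List.length_take]; omega, ?_⟩
    rw [List.getElem_take]
    exact hje
  have h1 : 1 ≤ (l.take k).count M := List.count_pos_iff.mpr hmem
  have h2 : 1 ≤ (l[k] :: l.drop (k + 1)).count M := by
    rw [List.count_cons]; simp [hke]
  calc 2 ≤ (l.take k).count M + (l[k] :: l.drop (k + 1)).count M := by omega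
    _ = l.count M := by rw [← List.count_append, hsplit]

-- count 1 means no second position carries the value
theorem unique_of_count_eq_one (l : List Int) (M : Int) (k : Nat) (hk : k < l.length)
    (hv : l[k] = M) (hc : l.count M = 1) :
    ∀ j, (h : j < l.length) → j ≠ k → l[j] ≠ M := by
  intro j hj hjk hje
  have two_le : 2 ≤ l.count M := by
    rcases Nat.lt_or_ge j k with hlt | hge
    · exact two_le_count_of_two_pos l M j k hj hk hlt hje hv
    · exact two_le_count_of_two_pos l M k j hk hj (by omega) hv hje
  omega

-- ===== VERDICT (by name: the statement is the Claim_ definition above) =====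
theorem checkPick_spec : Claim_equal_checkPick := by
  intro arr _
  unfold Spec_checkPick
  match harr : arr with
  | [] => rfl
  | a :: rest =>
    -- facts about B's scan
    have hinv := pvScanB_inv rest [a] a (by simp) (by simp)
    simp only [List.length_cons, List.length_nil, Nat.zero_add, List.idxOf_cons_self,
      List.count_cons_self, List.count_nil, List.singleton_append] at hinv
    push_cast at hinv
    set r := pvScanB rest 1 a 0 1 with hr
    obtain ⟨hmem, hmax, hidx, hcnt⟩ := hinv
    set l := a :: rest with hl
    set M := r.1 with hM
    set k := l.idxOf M with hk
    have hklt : k < l.length := List.idxOf_lt_length_of_mem hmem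
    have hgetk : l[k] = M := List.getElem_idxOf hklt
    have hBr : checkPick_alt l =
        if r.2.2 = 1 ∧ 0 < r.2.1 ∧ r.2.1 < ((l.length : Int)) - 1 then M else 0 := rfl
    by_cases hone : l.count M = 1
    · -- unique strict maximum at position k
      have huniq := unique_of_count_eq_one l M k hklt hgetk hone
      have hcond : CondA l k := by
        constructor
        · intro x hx
          rw [pvGet_eq l x (by omega), pvGet_eq l k hklt, hgetk]
          exact lt_of_le_of_ne (hmax _ (List.getElem_mem _)) (huniq x (by omega) (by omega))
        · intro x hx hkx
          rw [pvGet_eq l x hx, pvGet_eq l k hklt, hgetk]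
          exact lt_of_le_of_ne (hmax _ (List.getElem_mem _)) (huniq x hx (by omega))
      have huniqC : ∀ i ∈ List.range l.length, CondA l i → i = k := by
        intro i hmem' hi
        have hilt : i < l.length := List.mem_range.mp hmem'
        by_contra hne
        rcases Nat.lt_or_ge i k with hc | hc
        · have := hcond.1 i hc
          have := hi.2 k hklt (by omega)
          omega
        · have hc' : k < i := by omega
          have := hi.1 k hc'
          have := hcond.2 i hilt (by omega)
          omega
      have hA : checkPick l = if k = 0 ∨ k = l.length - 1 then 0 else pvGet l k := by
        unfold checkPick
        exact pvFindA_unique l k hcond _ (List.mem_range.mpr hklt) huniqC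
      rw [hA, hBr, hidx, hcnt]
      by_cases hends : k = 0 ∨ k = l.length - 1
      · rw [if_pos hends, if_neg]
        rintro ⟨-, h2, h3⟩
        omega
      · rw [if_neg hends, if_pos, pvGet_eq l k hklt, hgetk]
        refine ⟨by exact_mod_cast hone, by omega, by omega⟩
    · -- no strict maximum: both sides return 0
      have hnone : ∀ i ∈ List.range l.length, ¬ CondA l i := by
        intro i hi hcond
        have hilt : i < l.length := List.mem_range.mp hi
        -- l[i] is maximal, so l[i] = M and i = k
        have hieq : l[i] = M := by
          rcases Nat.lt_trichotomy i k with hc | hc | hc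
          · have h1 := hcond.2 k hklt hc
            rw [pvGet_eq l i hilt, pvGet_eq l k hklt, hgetk] at h1
            have h2 := hmax l[i] (List.getElem_mem _)
            omega
          · subst hc; exact hgetk
          · have h1 := hcond.1 k hc
            rw [pvGet_eq l i hilt, pvGet_eq l k hklt, hgetk] at h1
            have h2 := hmax l[i] (List.getElem_mem _)
            omega
        -- all other positions differ from M, so the count would be 1
        apply hone
        apply count_eq_one_of_unique l M i hilt hieq
        intro j hj hji hje
        rcases Nat.lt_or_ge j i with hc | hc
        · have h1 := hcond.1 j hc
          rw [pvGet_eq l j hj, pvGet_eq l i hilt, hieq, hje] at h1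
          omega
        · have h1 := hcond.2 j hj (by omega)
          rw [pvGet_eq l j hj, pvGet_eq l i hilt, hieq, hje] at h1
          omega
      have hA : checkPick l = 0 := pvFindA_none l _ hnone
      rw [hA, hBr, if_neg]
      rintro ⟨h1, -⟩
      rw [hcnt] at h1
      exact hone (by exact_mod_cast h1)
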